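-- pv_equiv track=rewrite | github.com/pypi-data/pypi-mirror-11 | packages/p4util/p4util-0.0.1-py2.py3-none-any.whl/p4util/jnlparse.py | gen_recs
-- ===== SOURCE A (Python) =====
-- def gen_recs(lines):
--     '''input lines, generates record lines'''
--     rec_actions = '@pv@ @dv@ @rv@ @ex@ @nx@ @mx@'.split()
--     rec = []
--     for line in lines:
--         if rec and len(line)>3 and \
--            line[0:4] in rec_actions: # record ends
--             yield '\n'.join(rec)
--             rec = []
--         rec.append(line)
-- ===== SOURCE B (Python) =====
-- def gen_recs(lines):
--     '''input lines, generates record lines'''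
--     rec_actions = '@pv@ @dv@ @rv@ @ex@ @nx@ @mx@'.split()
--     lines = list(lines)
--     starts = [i for i, line in enumerate(lines)
--               if i > 0 and len(line) > 3 and line[0:4] in rec_actions]
--     bounds = [0] + starts
--     for a, b in zip(bounds, bounds[1:]):
--         yield '\n'.join(lines[a:b])
-- ===== Notes on version B (the rewrite author's own statement) =====
-- stated objective: alternative
-- what changed: B replaces A's streaming buffer with an index-then-slice decomposition: it materializes the lines, collects boundary indices of record-start lines, and joins the slice between each pair of consecutive boundaries (the trailing block after the last boundary is never paired, matching A).
import Mathlib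
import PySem

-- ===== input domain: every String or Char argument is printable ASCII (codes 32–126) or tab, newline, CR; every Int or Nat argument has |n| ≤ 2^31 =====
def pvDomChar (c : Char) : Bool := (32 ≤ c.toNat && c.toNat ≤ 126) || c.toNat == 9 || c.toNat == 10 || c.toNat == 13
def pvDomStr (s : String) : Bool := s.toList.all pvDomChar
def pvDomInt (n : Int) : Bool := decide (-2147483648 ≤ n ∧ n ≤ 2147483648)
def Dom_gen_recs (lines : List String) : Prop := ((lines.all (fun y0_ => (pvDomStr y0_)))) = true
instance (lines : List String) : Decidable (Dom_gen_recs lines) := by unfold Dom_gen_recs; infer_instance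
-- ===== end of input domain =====

-- B groups lines into records by collecting boundary indices and slicing between
-- consecutive boundaries instead of streaming a buffer (objective: alternative decomposition).

-- shared record-start test (identical text in both Pythons)
def pvRecActions : List String := PySem.Str.split₀ "@pv@ @dv@ @rv@ @ex@ @nx@ @mx@"

def pvIsStart (line : String) : Bool :=
  decide (3 < PySem.Str.len line) && pvRecActions.contains (PySem.Str.slice line (some 0) (some 4))

-- ===== PORT A =====
def gen_recs (lines : List String) : List String :=
  (lines.foldl
    (fun (st : List String × List String) line =>
      if (!st.2.isEmpty) && pvIsStart line then
        (st.1 ++ [PySem.Str.join "\n" st.2], [line])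
      else
        (st.1, st.2 ++ [line]))
    ([], [])).1

-- ===== PORT B =====
def gen_recs_alt (lines : List String) : List String :=
  let starts : List Int :=
    ((PySem.List.enumerate lines 0).filter
      (fun p => decide (0 < p.1) && pvIsStart p.2)).map (·.1)
  let bounds : List Int := 0 :: starts
  (bounds.zip bounds.tail).map
    (fun p => PySem.Str.join "\n" (PySem.List.slice lines (some p.1) (some p.2)))

-- ===== PRECONDITION & SPEC =====
def Spec_gen_recs (lines : List String) (out : List String) : Prop := out = gen_recs_alt lines
instance (lines : List String) (out : List String) : Decidable (Spec_gen_recs lines out) := by unfold Spec_gen_recs; infer_instance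

-- ===== CLAIM (what is proved, stated in full; the proofs are below) =====
def Claim_equal_gen_recs : Prop := ∀ (lines : List String), Dom_gen_recs lines → Spec_gen_recs lines (gen_recs lines)

-- ===== LEMMAS AND PROOFS =====

-- A's streaming behaviour, recursively: records produced after buffer `acc`
def recsFrom (acc : List String) : List String → List String
  | [] => []
  | l :: ls =>
    if pvIsStart l then PySem.Str.join "\n" acc :: recsFrom [l] ls
    else recsFrom (acc ++ [l]) ls

-- indices ≥ i of start lines
def sFrom (i : Int) : List String → List Int
  | [] => []
  | l :: ls => if pvIsStart l then i :: sFrom (i + 1) ls else sFrom (i + 1) ls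

-- B's emit loop, recursively over the boundary list
def pairsJoin (lines : List String) : List Int → List String
  | a :: b :: bs =>
      PySem.Str.join "\n" (PySem.List.slice lines (some a) (some b)) :: pairsJoin lines (b :: bs)
  | _ => []

theorem foldA_eq (ls : List String) : ∀ (out acc : List String), acc ≠ [] →
    (ls.foldl
      (fun (st : List String × List String) line =>
        if (!st.2.isEmpty) && pvIsStart line then
          (st.1 ++ [PySem.Str.join "\n" st.2], [line])
        else
          (st.1, st.2 ++ [line]))
      (out, acc)).1 = out ++ recsFrom acc ls := by
  induction ls with
  | nil => intro out acc _; simp [recsFrom]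
  | cons l ls ih =>
    intro out acc hacc
    have hne : acc.isEmpty = false := by simpa using hacc
    simp only [List.foldl]
    by_cases h : pvIsStart l = true
    · rw [if_pos (by simp [hne, h]), ih _ [l] (by simp)]
      simp [recsFrom, h]
    · rw [if_neg (show ¬((!acc.isEmpty && pvIsStart l) = true) from by simp [h]),
        ih _ (acc ++ [l]) (by simp)]
      simp [recsFrom, h]

theorem enum_filter_eq (ls : List String) : ∀ (i : Int), 0 < i →
    ((PySem.List.enumerate ls i).filter
      (fun p => decide (0 < p.1) && pvIsStart p.2)).map (·.1) = sFrom i ls := by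
  induction ls with
  | nil => intro i _; simp [PySem.List.enumerate_nil, sFrom]
  | cons l ls ih =>
    intro i hi
    rw [PySem.List.enumerate_cons]
    by_cases h : pvIsStart l = true
    · simp [List.filter, h, hi, sFrom, ih (i + 1) (by omega)]
    · simp [List.filter, h, hi, sFrom, ih (i + 1) (by omega)]

theorem zip_tail_eq (lines : List String) (bs : List Int) : ∀ (a : Int),
    (((a :: bs).zip bs).map
      (fun p => PySem.Str.join "\n" (PySem.List.slice lines (some p.1) (some p.2))))
      = pairsJoin lines (a :: bs) := by
  induction bs with
  | nil => intro a; simp [pairsJoin]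
  | cons b bs ih => intro a; simp [pairsJoin, ih b]

theorem main_eq (ls : List String) : ∀ (lines acc : List String) (j : Nat), acc ≠ [] →
    List.drop j lines = acc ++ ls →
    recsFrom acc ls = pairsJoin lines ((j : Int) :: sFrom ((j : Int) + (acc.length : Int)) ls) := by
  induction ls with
  | nil => intro lines acc j _ _; simp [recsFrom, pairsJoin, sFrom]
  | cons l ls ih =>
    intro lines acc j hacc hdrop
    have hdrop' : List.drop (j + acc.length) lines = l :: ls := by
      have h2 : List.drop acc.length (List.drop j lines) = l :: ls := by
        rw [hdrop, List.drop_left]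
      rw [List.drop_drop] at h2
      exact h2
    by_cases h : pvIsStart l = true
    · have hslice : PySem.List.slice lines (some (j : Int)) (some ((j : Int) + (acc.length : Int)))
          = acc := by
        rw [PySem.List.slice_natCast_add, hdrop, List.take_left]
      have := ih lines [l] (j + acc.length) (by simp) (by exact hdrop')
      simp only [recsFrom, sFrom, pairsJoin, h, if_pos]
      rw [hslice]
      refine congrArg _ ?_
      simpa [Nat.cast_add, add_assoc] using this
    · have := ih lines (acc ++ [l]) j (by simp) (by rw [hdrop, List.append_cons])
      simp only [recsFrom, sFrom, h, Bool.false_eq_true, if_false]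
      simpa [Nat.cast_add, add_assoc] using this

-- ===== VERDICT (by name: the statement is the Claim_ definition above) =====
theorem gen_recs_spec : Claim_equal_gen_recs := by
  intro lines _
  unfold Spec_gen_recs gen_recs gen_recs_alt
  cases lines with
  | nil => simp [PySem.List.enumerate_nil]
  | cons l ls =>
    rw [PySem.List.enumerate_cons]
    simp only [zero_add]
    have hfilter : (((0 : Int), l) :: PySem.List.enumerate ls 1).filter
        (fun p => decide (0 < p.1) && pvIsStart p.2)
        = (PySem.List.enumerate ls 1).filter (fun p => decide (0 < p.1) && pvIsStart p.2) := by
      simp [List.filter]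
    simp only [List.foldl, List.isEmpty_nil, Bool.not_true, Bool.false_and, Bool.false_eq_true,
      if_false, List.nil_append, List.tail_cons, hfilter]
    rw [foldA_eq ls [] [l] (by simp), enum_filter_eq ls 1 (by omega),
      zip_tail_eq (l :: ls) (sFrom 1 ls) 0]
    simpa using main_eq ls (l :: ls) [l] 0 (by simp) (by simp)
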